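-- pv_equiv track=rewrite | github.com/JunJon09/handLangage | modules/findWord_DTW/writeSkeltonCsv.py | fixList
-- ===== SOURCE A (Python) =====
-- def fixList(data):
--     for i, d in enumerate(data):
--         if len(d) == 0:
--             if i == 0:
--                 next_list = next(x for x in data if len(x) != 0)
--                 data[i] = next_list
--             else:
--                 prev_val = next(x for x in reversed(data) if len(x) != 0)
--                 data[i] = prev_val
--     return data
-- ===== SOURCE B (Python) =====
-- def fixList(data):
--     first = next((d for d in data if d), None)
--     if first is None:
--         return data
--     last = next(d for d in reversed(data) if d)
--     for i, d in enumerate(data):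
--         if not d:
--             data[i] = first if i == 0 else last
--     return data
-- ===== Notes on version B (the rewrite author's own statement) =====
-- stated objective: alternative
-- what changed: B precomputes the first and last non-empty sublist once and fills all empty slots in a single pass, instead of A's per-empty-slot linear rescans of the (mutated) list.
import Mathlib
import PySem

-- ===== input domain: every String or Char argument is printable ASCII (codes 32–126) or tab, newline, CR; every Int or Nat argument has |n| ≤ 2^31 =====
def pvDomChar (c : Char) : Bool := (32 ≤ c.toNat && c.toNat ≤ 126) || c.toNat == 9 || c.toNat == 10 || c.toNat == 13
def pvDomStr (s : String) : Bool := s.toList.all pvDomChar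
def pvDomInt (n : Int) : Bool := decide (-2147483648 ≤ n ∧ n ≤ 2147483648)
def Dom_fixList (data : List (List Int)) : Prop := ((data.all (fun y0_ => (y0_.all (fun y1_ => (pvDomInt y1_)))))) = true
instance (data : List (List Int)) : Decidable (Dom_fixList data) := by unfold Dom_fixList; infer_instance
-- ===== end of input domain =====

-- B replaces A's per-empty-slot rescans of the list with two precomputed values
-- (first and last non-empty sublist) and one fill pass (objective: alternative).
-- A mutates its argument in place; the equivalence proved here is about the return value only.

-- ===== PORT A =====
-- A's loop over enumerate(data) with in-place assignment: a fold over the indices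
-- carrying the current list state; `next(x for x in data if len(x)!=0)` is find?,
-- `next(x for x in reversed(data) if len(x)!=0)` is reverse.find?.  Where Python
-- would raise StopIteration (outside Pre_) the port uses `.getD []`.
def fixList (data : List (List Int)) : List (List Int) :=
  (List.range data.length).foldl
    (fun d i =>
      if (d.getD i []).isEmpty then
        if i = 0 then
          d.set 0 ((d.find? (fun x => !x.isEmpty)).getD [])
        else
          d.set i ((d.reverse.find? (fun x => !x.isEmpty)).getD [])
      else d)
    data

-- ===== PORT B =====
def fixList_alt (data : List (List Int)) : List (List Int) :=
  match data.find? (fun x => !x.isEmpty) with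
  | none => data
  | some first =>
    let last := (data.reverse.find? (fun x => !x.isEmpty)).getD []
    data.zipIdx.map (fun p => if p.1.isEmpty then (if p.2 = 0 then first else last) else p.1)

-- ===== PRECONDITION & SPEC =====
-- Pre_ excludes exactly the inputs where A raises StopIteration: a non-empty list
-- all of whose sublists are empty.
def Pre_fixList (data : List (List Int)) : Prop :=
  data = [] ∨ (data.any (fun x => !x.isEmpty)) = true
instance (data : List (List Int)) : Decidable (Pre_fixList data) := by
  unfold Pre_fixList; infer_instance
def pvWitness_fixList : List (List Int) := [[], [1, 2], []]

def Spec_fixList (data : List (List Int)) (out : List (List Int)) : Prop := out = fixList_alt data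
instance (data : List (List Int)) (out : List (List Int)) : Decidable (Spec_fixList data out) := by unfold Spec_fixList; infer_instance

-- ===== CLAIM (what is proved, stated in full; the proofs are below) =====
def Claim_equal_fixList : Prop := ∀ (data : List (List Int)), Dom_fixList data → Pre_fixList data → Spec_fixList data (fixList data)

-- ===== LEMMAS AND PROOFS =====

-- the element-wise fill B performs, as a structural recursion with an explicit index
def pvFill (f l : List Int) : List (List Int) → Nat → List (List Int)
  | [], _ => []
  | x :: xs, i => (if x.isEmpty then (if i = 0 then f else l) else x) :: pvFill f l xs (i + 1)

theorem pvFill_length (f l : List Int) (xs : List (List Int)) (i : Nat) :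
    (pvFill f l xs i).length = xs.length := by
  induction xs generalizing i with
  | nil => rfl
  | cons x xs ih => simp [pvFill, ih]

theorem pvFill_append (f l : List Int) (xs ys : List (List Int)) (i : Nat) :
    pvFill f l (xs ++ ys) i = pvFill f l xs i ++ pvFill f l ys (i + xs.length) := by
  induction xs generalizing i with
  | nil => simp [pvFill]
  | cons x xs ih => simp [pvFill, ih]; ring_nf

theorem zipIdx_map_eq_pvFill (f l : List Int) (xs : List (List Int)) (i : Nat) :
    (xs.zipIdx i).map (fun p => if p.1.isEmpty then (if p.2 = 0 then f else l) else p.1)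
      = pvFill f l xs i := by
  induction xs generalizing i with
  | nil => rfl
  | cons x xs ih => simp only [List.zipIdx_cons, List.map_cons, pvFill, ih]

-- the last non-empty element of a filled prefix: either l itself, or the same as
-- the last non-empty element of the unfilled prefix
theorem pvFill_rev_find (f l : List Int) (hl : l ≠ [])
    (xs : List (List Int)) (i : Nat) (hxs : xs ≠ []) (hlen : 2 ≤ i + xs.length) :
    ∃ v, (pvFill f l xs i).reverse.find? (fun x => !x.isEmpty) = some v ∧
      (v = l ∨ xs.reverse.find? (fun x => !x.isEmpty) = some v) := by
  rcases List.eq_nil_or_concat xs with h | ⟨ys, a, h⟩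
  · exact absurd h hxs
  subst h
  have hj : i + ys.length ≠ 0 := by
    have hlc : (ys.concat a).length = ys.length + 1 := by simp
    omega
  rw [List.concat_eq_append, pvFill_append]
  simp only [List.reverse_append, List.find?_append]
  have hlE : l.isEmpty = false := by simpa [List.isEmpty_iff] using hl
  by_cases ha : a.isEmpty
  · have h1 : pvFill f l [a] (i + ys.length) = [l] := by
      simp only [pvFill]; rw [if_pos ha, if_neg hj]
    refine ⟨l, ?_, Or.inl rfl⟩
    rw [h1]
    simp [hlE]
  · have h1 : pvFill f l [a] (i + ys.length) = [a] := by simp [pvFill, ha]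
    refine ⟨a, ?_, Or.inr ?_⟩
    · rw [h1]; simp [ha]
    · simp [ha]

theorem fixList_step_char (data : List (List Int)) (f l : List Int)
    (hf : data.find? (fun x => !x.isEmpty) = some f)
    (hl : data.reverse.find? (fun x => !x.isEmpty) = some l)
    (k : Nat) (hk : k ≤ data.length) :
    (List.range k).foldl
      (fun d i =>
        if (d.getD i []).isEmpty then
          if i = 0 then
            d.set 0 ((d.find? (fun x => !x.isEmpty)).getD [])
          else
            d.set i ((d.reverse.find? (fun x => !x.isEmpty)).getD [])
        else d)
      data
    = pvFill f l (data.take k) 0 ++ data.drop k := by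
  induction k with
  | zero => simp [pvFill]
  | succ k ih =>
    have hkd : k < data.length := by omega
    rw [List.range_succ, List.foldl_append, ih (by omega)]
    simp only [List.foldl_cons, List.foldl_nil]
    have hPlen : (pvFill f l (data.take k) 0).length = k := by
      rw [pvFill_length, List.length_take]; omega
    have hdrop : data.drop k = data[k] :: data.drop (k + 1) :=
      List.drop_eq_getElem_cons hkd
    have hget : (pvFill f l (data.take k) 0 ++ data.drop k).getD k [] = data[k] := by
      rw [List.getD_eq_getElem?_getD, List.getElem?_append_right (by omega), hPlen,
        Nat.sub_self, hdrop]
      rfl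
    have htake : data.take (k + 1) = data.take k ++ [data[k]] := by
      rw [List.take_add_one, List.getElem?_eq_getElem hkd]; rfl
    have hrhsP : pvFill f l (data.take (k + 1)) 0
        = pvFill f l (data.take k) 0
          ++ [if (data[k]).isEmpty then (if k = 0 then f else l) else data[k]] := by
      rw [htake, pvFill_append]
      simp only [pvFill, List.length_take]
      have : min k data.length = k := by omega
      rw [this]
      simp
    by_cases hE : (data[k]).isEmpty
    · rw [hget]
      simp only [hE, if_pos]
      by_cases hk0 : k = 0
      · subst hk0
        simp only [pvFill, List.nil_append, List.take_zero]
        have hd0 : data.drop 0 = data := by simp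
        rw [hd0, hf]
        rw [hrhsP]
        simp only [List.take_zero, pvFill, List.nil_append, hE, if_pos]
        have : data = data[0] :: data.drop 1 := by simpa using hdrop
        conv_lhs => rw [this]
        simp [List.set]
      · rw [if_neg hk0]
        have hrev : (pvFill f l (data.take k) 0 ++ data.drop k).reverse.find?
            (fun x => !x.isEmpty) = some l := by
          have hfl : data.reverse.find? (fun x => !x.isEmpty)
              = ((data.drop k).reverse.find? (fun x => !x.isEmpty)).or
                ((data.take k).reverse.find? (fun x => !x.isEmpty)) := by
            conv_lhs => rw [← List.take_append_drop k data]
            rw [List.reverse_append, List.find?_append]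
          rw [List.reverse_append, List.find?_append]
          rcases hsf : (data.drop k).reverse.find? (fun x => !x.isEmpty) with _ | v
          · rw [hsf, Option.none_or]
            rw [hfl, hsf, Option.none_or] at hl
            have hlne : l ≠ [] := by
              have := List.find?_some hl
              simpa [List.isEmpty_iff] using this
            have htk : data.take k ≠ [] := by
              intro h
              rw [h] at hl; simp at hl
            by_cases hk1 : k = 1
            · subst hk1
              have ht1 : data.take 1 = [data[0]] := by
                rw [List.take_add_one, List.take_zero, List.getElem?_eq_getElem (by omega)]
                rfl
              rw [ht1] at hl
              by_cases hE0 : (data[0]).isEmpty = true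
              · simp [hE0] at hl
              · simp only [Bool.not_eq_true] at hE0
                simp [hE0] at hl
                simp [ht1, pvFill, hl, hlne]
            · have hlen2 : 2 ≤ 0 + (data.take k).length := by
                rw [List.length_take]; omega
              obtain ⟨v, hv, hvl⟩ := pvFill_rev_find f l hlne (data.take k) 0 htk hlen2
              rw [hv]
              rcases hvl with h | h
              · rw [h]
              · rw [hl] at h; exact h ▸ rfl
          · rw [hsf, Option.some_or]
            rw [hfl, hsf, Option.some_or] at hl
            exact hl
        rw [hrev]
        simp only [Option.getD_some]
        rw [List.set_append, if_neg (by omega), hPlen, Nat.sub_self, hdrop]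
        rw [hrhsP]
        rw [show (if data[k].isEmpty = true then if k = 0 then f else l else data[k]) = l by
          rw [hE]; simp [hk0]]
        rw [List.set_cons_zero, List.append_assoc, List.singleton_append]
    · simp only [Bool.not_eq_true] at hE
      rw [hget, hrhsP, hE]
      rw [show (if false = true then if k = 0 then f else l else data[k]) = data[k] by simp]
      rw [hdrop, List.append_assoc, List.singleton_append]
      rw [if_neg (by decide)]

theorem fixList_eq_alt (data : List (List Int)) (h : Pre_fixList data) :
    fixList data = fixList_alt data := by
  rcases hf : data.find? (fun x => !x.isEmpty) with _ | f
  · have hd : data = [] := by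
      rcases h with h | h
      · exact h
      · exfalso
        rcases List.any_eq_true.mp h with ⟨x, hx, hxp⟩
        exact absurd hxp (by simpa using List.find?_eq_none.mp hf x hx)
    subst hd
    simp [fixList, fixList_alt]
  · have hfp : (!f.isEmpty) = true := List.find?_some (p := fun x : List Int => !x.isEmpty) hf
    have hsome : (data.reverse.find? (fun x => !x.isEmpty)).isSome :=
      List.find?_isSome.mpr
        ⟨f, List.mem_reverse.mpr (List.mem_of_find?_eq_some hf), hfp⟩
    obtain ⟨l, hl⟩ := Option.isSome_iff_exists.mp hsome
    unfold fixList fixList_alt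
    rw [hf]
    rw [fixList_step_char data f l hf hl data.length le_rfl]
    simp only [List.take_length, List.drop_length, List.append_nil, hl, Option.getD_some]
    rw [zipIdx_map_eq_pvFill]

-- ===== VERDICT (by name: the statement is the Claim_ definition above) =====
theorem fixList_spec : Claim_equal_fixList := by
  intro data _ hpre
  unfold Spec_fixList
  exact fixList_eq_alt data hpre
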